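-- pv_equiv track=rewrite | github.com/aloofzebra03/Agentic-AI-For-Education | concept_map_poc/description_analyzer.py | extract_topic_name_from_description
-- ===== SOURCE A (Python) =====
-- def extract_topic_name_from_description(description: str) -> str:
--     """
--     Auto-extract a topic name from the description if not provided
--
--     Args:
--         description (str): The user's description text
--
--     Returns:
--         str: Extracted topic name
--     """
--
--     # For very short descriptions, use the description itself
--     if len(description.split()) <= 3:
--         return description.title()
--
--     # For longer descriptions, try to extract the main subject
--     # This is a simple approach - could be enhanced with NLP
--     words = description.split()
--
--     # Look for capitalized words (potential proper nouns)
--     capitalized = [word for word in words if word[0].isupper() and len(word) > 2]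
--     if capitalized:
--         return capitalized[0]
--
--     # Look for scientific/technical terms (words longer than 6 characters)
--     technical_terms = [word for word in words if len(word) > 6 and word.isalpha()]
--     if technical_terms:
--         return technical_terms[0].title()
--
--     # Fallback: use first few words
--     return " ".join(words[:3]).title()
-- ===== SOURCE B (Python) =====
-- def extract_topic_name_from_description(description: str) -> str:
--     words = description.split()
--     if len(words) <= 3:
--         return description.title()
--     # Rank every word once (0 = capitalized candidate, 1 = technical term, 2 = other)
--     # and select the earliest word of minimal rank; render according to its rank.
--     def rank(word):
--         if word[0].isupper() and len(word) > 2: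
--             return 0
--         if len(word) > 6 and word.isalpha():
--             return 1
--         return 2
--     best = min(words, key=rank)
--     r = rank(best)
--     if r == 0:
--         return best
--     if r == 1:
--         return best.title()
--     return " ".join(words[:3]).title()
-- ===== Notes on version B (the rewrite author's own statement) =====
-- stated objective: alternative
-- what changed: A's staged fallback chain of two full filter scans is replaced by an argmin formulation: every word gets a rank (0 capitalized, 1 technical, 2 other) and B selects min(words, key=rank), then renders the chosen word according to its rank.
import Mathlib
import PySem

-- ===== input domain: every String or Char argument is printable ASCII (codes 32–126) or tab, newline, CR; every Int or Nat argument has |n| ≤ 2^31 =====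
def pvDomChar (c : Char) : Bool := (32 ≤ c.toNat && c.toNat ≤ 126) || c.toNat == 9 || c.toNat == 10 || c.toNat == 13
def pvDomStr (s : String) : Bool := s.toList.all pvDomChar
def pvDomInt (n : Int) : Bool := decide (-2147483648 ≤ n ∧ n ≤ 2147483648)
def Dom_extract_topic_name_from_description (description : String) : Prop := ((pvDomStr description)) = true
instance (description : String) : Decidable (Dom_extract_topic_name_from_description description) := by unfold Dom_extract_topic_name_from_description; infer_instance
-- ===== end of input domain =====

-- B replaces A's staged filter chain (capitalized words, then technical terms, then fallback) by
-- ranking every word once and selecting min(words, key=rank) (objective: alternative algorithm).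

-- str.title(), ported by hand (PySem has no title): exact on the ASCII domain, where the
-- "cased" characters are exactly the letters and titlecasing a letter is uppercasing it.
def pvTitleChars : List Char → Bool → List Char
  | [], _ => []
  | c :: cs, prevCased =>
    (if PySem.Chars.isalpha c then
        (if prevCased then PySem.Chars.lowerChar c else PySem.Chars.upperChar c)
      else c) :: pvTitleChars cs (PySem.Chars.isalpha c)

def pvTitle (s : String) : String := String.ofList (pvTitleChars s.toList false)

-- word[0].isupper() and len(word) > 2   (word[0] via pyGet?; none = IndexError, unreachable on split words)
def pvIsCapWord (w : String) : Bool :=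
  (match PySem.Str.pyGet? w 0 with | some c => PySem.Chars.isupper c | none => false)
    && decide (2 < PySem.Str.len w)

-- len(word) > 6 and word.isalpha()
def pvIsTechWord (w : String) : Bool :=
  decide (6 < PySem.Str.len w) && PySem.Str.strIsalpha w

-- ===== PORT A =====
def extract_topic_name_from_description (description : String) : String :=
  if (PySem.Str.split₀ description).length ≤ 3 then pvTitle description
  else
    let words := PySem.Str.split₀ description
    let capitalized := words.filter pvIsCapWord
    match capitalized with
    | w :: _ => w
    | [] =>
      let technical_terms := words.filter pvIsTechWord
      match technical_terms with
      | t :: _ => pvTitle t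
      | [] => pvTitle (PySem.Str.join " " (PySem.List.slice words none (some 3)))

-- ===== PORT B =====
-- rank(word) from Source B
def pvRank (w : String) : Int :=
  if pvIsCapWord w then 0 else if pvIsTechWord w then 1 else 2

def extract_topic_name_from_description_alt (description : String) : String :=
  let words := PySem.Str.split₀ description
  if words.length ≤ 3 then pvTitle description
  else
    match PySem.List.min? words pvRank with
    | none => ""  -- unreachable: words is nonempty here
    | some best =>
      let r := pvRank best
      if r == 0 then best
      else if r == 1 then pvTitle best
      else pvTitle (PySem.Str.join " " (PySem.List.slice words none (some 3)))

-- ===== PRECONDITION & SPEC =====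
def Spec_extract_topic_name_from_description (description : String) (out : String) : Prop := out = extract_topic_name_from_description_alt description
instance (description : String) (out : String) : Decidable (Spec_extract_topic_name_from_description description out) := by unfold Spec_extract_topic_name_from_description; infer_instance

-- ===== CLAIM (what is proved, stated in full; the proofs are below) =====
def Claim_equal_extract_topic_name_from_description : Prop := ∀ (description : String), Dom_extract_topic_name_from_description description → Spec_extract_topic_name_from_description description (extract_topic_name_from_description description)

-- ===== LEMMAS AND PROOFS =====

theorem pvRank_nonneg (w : String) : 0 ≤ pvRank w := by
  unfold pvRank; split_ifs <;> norm_num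

-- the step of the first-extremal foldl behind min? (with key pvRank)
def pvStep (acc : Option String) (x : String) : Option String :=
  match acc with
  | none => some x
  | some m => if pvRank x < pvRank m then some x else some m

theorem pvMin?_eq_foldl (ws : List String) :
    PySem.List.min? ws pvRank = ws.foldl pvStep none := by
  unfold PySem.List.min?
  apply PySem.List.foldl_congr_mem
  intro acc x _
  cases acc <;> rfl

-- the fold never leaves a rank-0 accumulator
theorem pvFoldZero (ws : List String) (m : String) (hm : pvRank m = 0) :
    ws.foldl pvStep (some m) = some m := by
  induction ws with
  | nil => rfl
  | cons w ws ih =>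
    have : ¬ pvRank w < pvRank m := by rw [hm]; exact not_lt.2 (pvRank_nonneg w)
    simp only [List.foldl_cons, pvStep, this, if_false, ih]

-- with a rank-1 accumulator, the fold returns the first rank-0 word, else the accumulator
theorem pvFoldOne (ws : List String) (m : String) (hm : pvRank m = 1) :
    ws.foldl pvStep (some m) = some ((ws.filter (fun w => pvRank w == 0)).head?.getD m) := by
  induction ws with
  | nil => rfl
  | cons w ws ih =>
    by_cases h0 : pvRank w = 0
    · have hlt : pvRank w < pvRank m := by omega
      simp only [List.foldl_cons, pvStep, List.filter_cons]
      rw [if_pos hlt, pvFoldZero ws w h0]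
      simp [h0]
    · have hge : ¬ pvRank w < pvRank m := by
        have := pvRank_nonneg w; unfold pvRank at *; split_ifs at * <;> omega
      simp only [List.foldl_cons, pvStep, List.filter_cons]
      rw [if_neg hge, ih]
      simp [h0]

-- with a rank-2 accumulator, the fold returns the first rank-0 word, else the first rank-1
-- word, else the accumulator
theorem pvFoldTwo (ws : List String) (m : String) (hm : pvRank m = 2) :
    ws.foldl pvStep (some m)
    = some ((ws.filter (fun w => pvRank w == 0)).head?.getD
        ((ws.filter (fun w => pvRank w == 1)).head?.getD m)) := by
  induction ws with
  | nil => rfl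
  | cons w ws ih =>
    by_cases h0 : pvRank w = 0
    · have hlt : pvRank w < pvRank m := by omega
      simp only [List.foldl_cons, pvStep, List.filter_cons]
      rw [if_pos hlt, pvFoldZero ws w h0]
      simp [h0]
    · by_cases h1 : pvRank w = 1
      · have hlt : pvRank w < pvRank m := by omega
        simp only [List.foldl_cons, pvStep, List.filter_cons]
        rw [if_pos hlt, pvFoldOne ws w h1]
        simp [h1]
      · have h2 : pvRank w = 2 := by
          have := pvRank_nonneg w; unfold pvRank at *; split_ifs at * <;> omega
        have hge : ¬ pvRank w < pvRank m := by omega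
        simp only [List.foldl_cons, pvStep, List.filter_cons]
        rw [if_neg hge, ih]
        simp [h0, h1]

-- min(words, key=rank) on a nonempty list: first rank-0 word, else first rank-1 word, else the head
theorem pvMinChar (w : String) (rest : List String) :
    PySem.List.min? (w :: rest) pvRank
    = some (((w :: rest).filter (fun x => pvRank x == 0)).head?.getD
        (((w :: rest).filter (fun x => pvRank x == 1)).head?.getD w)) := by
  rw [pvMin?_eq_foldl]
  simp only [List.foldl_cons, pvStep]
  by_cases h0 : pvRank w = 0
  · rw [pvFoldZero rest w h0]
    simp [h0]
  · by_cases h1 : pvRank w = 1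
    · rw [pvFoldOne rest w h1]
      simp [h1]
    · have h2 : pvRank w = 2 := by
        have := pvRank_nonneg w; unfold pvRank at *; split_ifs at * <;> omega
      rw [pvFoldTwo rest w h2]
      simp [h0, h1]

-- rank 0 names exactly A's "capitalized" predicate
theorem pvFilterZero (ws : List String) :
    ws.filter (fun x => pvRank x == 0) = ws.filter pvIsCapWord := by
  apply List.filter_congr
  intro x _
  unfold pvRank
  split_ifs with h1 h2 <;> simp [h1]

-- on a list without capitalized words, rank 1 names exactly A's "technical" predicate
theorem pvFilterOne (ws : List String) (h : ∀ x ∈ ws, pvIsCapWord x = false) :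
    ws.filter (fun x => pvRank x == 1) = ws.filter pvIsTechWord := by
  apply List.filter_congr
  intro x hx
  unfold pvRank
  rw [h x hx]
  simp only [Bool.false_eq_true, if_false]
  split_ifs with ht <;> simp [ht]

-- ===== VERDICT (by name: the statement is the Claim_ definition above) =====
theorem extract_topic_name_from_description_spec : Claim_equal_extract_topic_name_from_description := by
  intro description _
  show _ = _
  unfold extract_topic_name_from_description extract_topic_name_from_description_alt
  by_cases h : (PySem.Str.split₀ description).length ≤ 3
  · simp [h]
  · simp only [h, if_false]
    cases hw : PySem.Str.split₀ description with
    | nil => rw [hw] at h; simp at h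
    | cons w rest =>
      rw [pvMinChar, pvFilterZero]
      cases hc : (w :: rest).filter pvIsCapWord with
      | cons c cs =>
        have hc0 : pvRank c = 0 := by
          have : pvIsCapWord c = true := by
            have : c ∈ (w :: rest).filter pvIsCapWord := by rw [hc]; exact List.mem_cons_self
            exact (List.mem_filter.1 this).2
          simp [pvRank, this]
        simp [hc0]
      | nil =>
        have hnc : ∀ x ∈ (w :: rest), pvIsCapWord x = false := by
          intro x hx
          by_contra hfx
          have : x ∈ (w :: rest).filter pvIsCapWord :=
            List.mem_filter.2 ⟨hx, by simpa using hfx⟩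
          simp [hc] at this
        rw [pvFilterOne _ hnc]
        cases ht : (w :: rest).filter pvIsTechWord with
        | cons t ts =>
          have ht1 : pvRank t = 1 := by
            have htm : t ∈ (w :: rest).filter pvIsTechWord := by rw [ht]; exact List.mem_cons_self
            have h1 : pvIsTechWord t = true := (List.mem_filter.1 htm).2
            have h0 : pvIsCapWord t = false := hnc t (List.mem_of_mem_filter htm)
            simp [pvRank, h0, h1]
          simp [ht1]
        | nil =>
          have hw2 : pvRank w = 2 := by
            have h0 : pvIsCapWord w = false := hnc w List.mem_cons_self
            have h1 : pvIsTechWord w = false := by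
              by_contra hfx
              have : w ∈ (w :: rest).filter pvIsTechWord :=
                List.mem_filter.2 ⟨List.mem_cons_self, by simpa using hfx⟩
              simp [ht] at this
            simp [pvRank, h0, h1]
          simp [hw2]
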